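-- pv_equiv track=rewrite | github.com/alexiskuypersai-art/AI-Data-Intelligence-Projects | algorithms/python/string_case_solver.py | solve
-- ===== SOURCE A (Python) =====
-- def solve(s):
--     upper_count = 0
--     for char in s :
--         if char.isupper() :
--             upper_count = upper_count + 1
--         else :
--             upper_count = upper_count - 1
--     if upper_count > 0 :
--         return s.upper()
--     else :
--         return s.lower()
-- ===== SOURCE B (Python) =====
-- def solve(s):
--     if not s:
--         return s.lower()
--     chars = sorted(s, key=str.isupper, reverse=True)
--     return s.upper() if chars[len(s) // 2].isupper() else s.lower()
-- ===== Notes on version B (the rewrite author's own statement) =====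
-- stated objective: alternative
-- what changed: Replaces A's running signed +1/-1 tally over the characters with a median-of-sorted test: stably sort the characters with uppercase first (sorted(s, key=str.isupper, reverse=True)) and uppercase the string iff the middle character of that arrangement is uppercase.
import Mathlib
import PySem

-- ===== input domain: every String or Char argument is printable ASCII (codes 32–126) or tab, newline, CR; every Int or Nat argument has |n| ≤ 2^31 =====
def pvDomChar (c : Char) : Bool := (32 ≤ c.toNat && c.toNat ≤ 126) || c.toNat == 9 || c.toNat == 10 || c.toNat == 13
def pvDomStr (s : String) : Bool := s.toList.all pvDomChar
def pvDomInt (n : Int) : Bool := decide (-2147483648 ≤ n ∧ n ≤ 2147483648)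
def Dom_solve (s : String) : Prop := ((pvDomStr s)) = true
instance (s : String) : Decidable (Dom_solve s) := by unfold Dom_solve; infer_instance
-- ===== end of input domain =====

-- B decides the case by a different algorithm: it stably sorts the characters with
-- uppercase first (key=str.isupper, reverse=True) and inspects the middle character,
-- instead of A's running signed +1/-1 tally; objective: alternative.


-- ===== PORT A =====
def solve (s : String) : String :=
  let upper_count : Int :=
    s.toList.foldl (fun acc c => if PySem.Chars.isupper c then acc + 1 else acc - 1) 0
  if upper_count > 0 then PySem.Str.upper s else PySem.Str.lower s

-- ===== PORT B =====
-- key=str.isupper: Python bool keys compare as 0 < 1, ported as the 0/1 indicator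
def solve_alt (s : String) : String :=
  if s.toList.isEmpty then PySem.Str.lower s
  else
    let chars := PySem.List.sorted s.toList
      (fun c => if PySem.Chars.isupper c then (1 : Nat) else 0) true
    if PySem.Chars.isupper
        (PySem.List.pyGetD chars (PySem.Int.floordiv (PySem.Str.len s) 2) ' ')
    then PySem.Str.upper s else PySem.Str.lower s

-- ===== PRECONDITION & SPEC =====
def Spec_solve (s : String) (out : String) : Prop := out = solve_alt s
instance (s : String) (out : String) : Decidable (Spec_solve s out) := by unfold Spec_solve; infer_instance

-- ===== CLAIM (what is proved, stated in full; the proofs are below) =====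
def Claim_equal_solve : Prop := ∀ (s : String), Dom_solve s → Spec_solve s (solve s)

-- ===== LEMMAS AND PROOFS =====

-- A's signed tally equals 2·(uppercase count) − length, shifted by the start accumulator.
theorem solve_tally (l : List Char) (acc : Int) :
    l.foldl (fun acc c => if PySem.Chars.isupper c then acc + 1 else acc - 1) acc
      = acc + 2 * (l.countP (fun c => PySem.Chars.isupper c) : Nat) - (l.length : Nat) := by
  induction l generalizing acc with
  | nil => simp
  | cons c t ih =>
      simp only [List.foldl_cons, List.countP_cons, List.length_cons, ih]
      by_cases h : PySem.Chars.isupper c = true <;> simp [h] <;> ring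

-- In a list pairwise-sorted with uppercase (key 1) before the rest (key 0),
-- the element at index m is uppercase exactly when m is below the uppercase count.
theorem upper_prefix (t : List Char)
    (h : t.Pairwise (fun a b =>
      (if PySem.Chars.isupper b then (1 : Nat) else 0)
        ≤ (if PySem.Chars.isupper a then (1 : Nat) else 0)))
    (m : Nat) (hm : m < t.length) :
    (PySem.Chars.isupper t[m] = true ↔ m < t.countP (fun c => PySem.Chars.isupper c)) := by
  induction t generalizing m with
  | nil => simp at hm
  | cons c rest ih =>
      rcases List.pairwise_cons.mp h with ⟨hc, hrest⟩
      by_cases hcu : PySem.Chars.isupper c = true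
      · cases m with
        | zero => simp [hcu]
        | succ k =>
            have hk : k < rest.length := by simpa using hm
            simpa [List.countP_cons, hcu, Nat.succ_lt_succ_iff] using ih hrest k hk
      · have hall : ∀ b ∈ rest, ¬ PySem.Chars.isupper b = true := by
          intro b hb hbu
          have := hc b hb
          simp [hbu, hcu] at this
        have hcount : (c :: rest).countP (fun x => PySem.Chars.isupper x) = 0 := by
          simp only [List.countP_eq_zero]
          intro b hb
          cases List.mem_cons.mp hb with
          | inl he => simpa [he] using hcu
          | inr hi => simpa using hall b hi
        rw [hcount]
        simp only [Nat.not_lt_zero, iff_false]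
        cases m with
        | zero => simpa using hcu
        | succ k =>
            have hk : k < rest.length := by simpa using hm
            exact hall _ (List.getElem_mem hk)

-- ===== VERDICT (by name: the statement is the Claim_ definition above) =====
theorem solve_spec : Claim_equal_solve := by
  intro s _
  unfold Spec_solve solve solve_alt
  set l := s.toList with hl
  set key := fun c => if PySem.Chars.isupper c then (1 : Nat) else 0 with hkey
  by_cases hnil : l.isEmpty
  · have : l = [] := List.isEmpty_iff.mp hnil
    simp [this]
  · set chars := PySem.List.sorted l key true with hchars
    have hperm : chars.Perm l := PySem.List.sorted_perm l key true
    have hlen : chars.length = l.length := hperm.length_eq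
    have hcnt : chars.countP (fun c => PySem.Chars.isupper c)
        = l.countP (fun c => PySem.Chars.isupper c) := hperm.countP_eq _
    have hpos : 0 < l.length :=
      List.length_pos_of_ne_nil (by simpa [List.isEmpty_iff] using hnil)
    have hidx : (PySem.Int.floordiv (PySem.Str.len s) 2) = ((l.length / 2 : Nat) : Int) := by
      rw [PySem.Str.len_eq, ← hl]
      exact_mod_cast PySem.Int.floordiv_natCast l.length 2
    have hm : l.length / 2 < chars.length := by omega
    have hget : PySem.List.pyGetD chars (PySem.Int.floordiv (PySem.Str.len s) 2) ' '
        = chars[l.length / 2] := by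
      rw [hidx, PySem.List.pyGetD_natCast]
      exact List.getD_eq_getElem _ _ hm
    have hpw := PySem.List.sorted_pairwise_rev l key
    have hiff := upper_prefix chars (by simpa [hkey] using hpw) (l.length / 2) hm
    rw [hcnt] at hiff
    have htal := solve_tally l 0
    simp only [hnil, htal, hget]
    by_cases hu : 2 * l.countP (fun c => PySem.Chars.isupper c) > l.length
    · have h2 : PySem.Chars.isupper chars[l.length / 2] = true := hiff.mpr (by omega)
      simp [h2]
      intro hle
      exfalso; omega
    · have h2 : ¬ PySem.Chars.isupper chars[l.length / 2] = true := by
        intro hc; exact absurd (hiff.mp hc) (by omega)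
      simp [h2]
      intro hlt
      exfalso; omega
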